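-- pv_equiv track=rewrite | github.com/Ryan-Holben/redditSample2 | classify.py | remove_soft_caps
-- ===== SOURCE A (Python) =====
-- def remove_soft_caps(dataset):
--   deltas = []
--   for i in range(len(dataset)-1):
--     deltas.append(dataset[i+1][1] - dataset[i][1])
--   jumps = []
--   for i in range(len(deltas)):
--     if deltas[i] <  -25:
--       jumps.append(deltas[i])
--     else:
--       jumps.append(0)
--   sum = 0
--   for i in range(len(jumps)):
--     sum += jumps[i]
--     dataset[i+1][1] -= sum
--   return dataset
-- ===== SOURCE B (Python) =====
-- def remove_soft_caps(dataset):
--   total = 0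
--   prev = None
--   for i in range(len(dataset) - 1):
--     cur = dataset[i + 1][1]
--     if prev is None:
--       prev = dataset[0][1]
--     if cur - prev < -25:
--       total += cur - prev
--     dataset[i + 1][1] = cur - total
--     prev = cur
--   return dataset
-- ===== Notes on version B (the rewrite author's own statement) =====
-- stated objective: simpler
-- what changed: Replaces A's three passes with three intermediate lists (deltas, jumps, cumulative-sum loop) by a single pass that keeps a running offset and the previous element's original value, updating the list as it goes.
-- outside the precondition, e.g. on remove_soft_caps([[1, 2], [3]]): A raises IndexError, B raises IndexError
import Mathlib
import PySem

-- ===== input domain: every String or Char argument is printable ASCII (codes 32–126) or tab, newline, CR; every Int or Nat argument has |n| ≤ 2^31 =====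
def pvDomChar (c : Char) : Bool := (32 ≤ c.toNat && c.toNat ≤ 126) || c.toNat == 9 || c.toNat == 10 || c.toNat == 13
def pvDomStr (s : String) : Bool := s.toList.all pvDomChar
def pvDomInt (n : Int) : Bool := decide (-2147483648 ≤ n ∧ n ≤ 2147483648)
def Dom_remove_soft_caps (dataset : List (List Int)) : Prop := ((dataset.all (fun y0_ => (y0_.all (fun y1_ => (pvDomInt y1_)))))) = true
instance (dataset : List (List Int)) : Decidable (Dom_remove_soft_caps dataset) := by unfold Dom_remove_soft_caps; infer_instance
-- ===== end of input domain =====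

-- B replaces A's three passes (deltas list, jumps list, cumulative-sum loop) by one pass with a
-- running offset and the previous original value; same in-place mutation as A (equivalence is about
-- the returned/final list value).

-- ===== PORT A =====
-- A reads dataset[i+1][1] etc. on an intact row; Pre_ guarantees the indices exist, so getD never
-- falls back to its default on admitted inputs.
def remove_soft_caps (dataset : List (List Int)) : List (List Int) :=
  let deltas := (List.range (dataset.length - 1)).foldl
    (fun acc i => acc ++ [((dataset.getD (i+1) []).getD 1 0) - ((dataset.getD i []).getD 1 0)]) []
  let jumps := (List.range deltas.length).foldl
    (fun acc i => acc ++ [if deltas.getD i 0 < -25 then deltas.getD i 0 else 0]) []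
  let fin := (List.range jumps.length).foldl
    (fun (p : Int × List (List Int)) i =>
      let s := p.1 + jumps.getD i 0
      (s, p.2.modify (i+1) (fun row => row.modify 1 (fun v => v - s)))) (0, dataset)
  fin.2

-- ===== PORT B =====
def remove_soft_caps_alt (dataset : List (List Int)) : List (List Int) :=
  let fin := (List.range (dataset.length - 1)).foldl
    (fun (st : Int × Option Int × List (List Int)) i =>
      let total := st.1; let prev := st.2.1; let out := st.2.2
      let cur := ((out.getD (i+1) []).getD 1 0)
      let prev' := match prev with
        | none => ((out.getD 0 []).getD 1 0)
        | some p => p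
      let total' := if cur - prev' < -25 then total + (cur - prev') else total
      (total', some cur, out.modify (i+1) (fun row => row.modify 1 (fun v => v - total'))))
    (0, none, dataset)
  fin.2.2

-- ===== PRECONDITION & SPEC =====
-- Pre_ excludes exactly the inputs where Python raises IndexError: a dataset of length ≥ 2
-- containing a row with fewer than 2 entries (both A and B index row[1] on every row then).
def Pre_remove_soft_caps (dataset : List (List Int)) : Prop :=
  2 ≤ dataset.length → ∀ row ∈ dataset, 2 ≤ row.length
instance (dataset : List (List Int)) : Decidable (Pre_remove_soft_caps dataset) := by
  unfold Pre_remove_soft_caps; infer_instance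
def pvWitness_remove_soft_caps : List (List Int) := [[0, 10], [1, -20], [2, -15]]
def Spec_remove_soft_caps (dataset : List (List Int)) (out : List (List Int)) : Prop := out = remove_soft_caps_alt dataset
instance (dataset : List (List Int)) (out : List (List Int)) : Decidable (Spec_remove_soft_caps dataset out) := by unfold Spec_remove_soft_caps; infer_instance

-- ===== CLAIM (what is proved, stated in full; the proofs are below) =====
def Claim_equal_remove_soft_caps : Prop := ∀ (dataset : List (List Int)), Dom_remove_soft_caps dataset → Pre_remove_soft_caps dataset → Spec_remove_soft_caps dataset (remove_soft_caps dataset)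

-- ===== LEMMAS AND PROOFS =====

-- original value at row j, column 1
def pvV (ds : List (List Int)) (j : Nat) : Int := ((ds.getD j []).getD 1 0)

-- A's third loop with jumps[i] replaced by its value (proof-only reformulation)
def pvStepA (ds : List (List Int)) (p : Int × List (List Int)) (i : Nat) : Int × List (List Int) :=
  let s := p.1 + (if pvV ds (i+1) - pvV ds i < -25 then pvV ds (i+1) - pvV ds i else 0)
  (s, p.2.modify (i+1) (fun row => row.modify 1 (fun v => v - s)))

-- B's loop body, named (identical term to the lambda in the port)
def pvStepB (st : Int × Option Int × List (List Int)) (i : Nat) :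
    Int × Option Int × List (List Int) :=
  let total := st.1; let prev := st.2.1; let out := st.2.2
  let cur := ((out.getD (i+1) []).getD 1 0)
  let prev' := match prev with
    | none => ((out.getD 0 []).getD 1 0)
    | some p => p
  let total' := if cur - prev' < -25 then total + (cur - prev') else total
  (total', some cur, out.modify (i+1) (fun row => row.modify 1 (fun v => v - total')))

lemma pv_getD_modify_ne (l : List (List Int)) (i j : Nat) (f : List Int → List Int) (h : j ≠ i) :
    (l.modify i f).getD j [] = l.getD j [] := by
  rw [List.getD_eq_getElem?_getD, List.getD_eq_getElem?_getD, List.getElem?_modify_ne f l h.symm]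

lemma pv_A_eq_fold (ds : List (List Int)) :
    remove_soft_caps ds = ((List.range (ds.length - 1)).foldl (pvStepA ds) (0, ds)).2 := by
  simp only [remove_soft_caps, PySem.List.foldl_append_singleton_eq_map, List.nil_append,
    List.length_map, List.length_range]
  refine congrArg Prod.snd ?_
  apply PySem.List.foldl_congr_mem
  intro acc i hi
  have hi' : i < ds.length - 1 := List.mem_range.mp hi
  simp only [PySem.List.getD_map_range _ _ _ _ hi', pvStepA, pvV]

lemma pv_B_eq_fold (ds : List (List Int)) :
    remove_soft_caps_alt ds = ((List.range (ds.length - 1)).foldl pvStepB (0, none, ds)).2.2 := rfl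

lemma pv_inv (ds : List (List Int)) :
    ∀ k, k ≤ ds.length - 1 →
      ((List.range k).foldl (pvStepA ds) (0, ds)).1
        = ((List.range k).foldl pvStepB (0, none, ds)).1
      ∧ ((List.range k).foldl (pvStepA ds) (0, ds)).2
        = ((List.range k).foldl pvStepB (0, none, ds)).2.2
      ∧ ((List.range k).foldl pvStepB (0, none, ds)).2.1
          = (if k = 0 then none else some (pvV ds k))
      ∧ ∀ j, (j = 0 ∨ k < j) →
          (((List.range k).foldl pvStepB (0, none, ds)).2.2).getD j [] = ds.getD j [] := by
  intro k
  induction k with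
  | zero => intro _; simp
  | succ k ih =>
    intro hk
    obtain ⟨h1, h2, h3, h4⟩ := ih (Nat.le_of_succ_le hk)
    simp only [List.range_succ, List.foldl_append, List.foldl_cons, List.foldl_nil]
    set a := (List.range k).foldl (pvStepA ds) (0, ds) with ha
    set b := (List.range k).foldl pvStepB (0, none, ds) with hb
    have hcur : (b.2.2.getD (k+1) []).getD 1 0 = pvV ds (k+1) := by
      rw [h4 (k+1) (Or.inr (Nat.lt_succ_self k))]; rfl
    have hprev : (match b.2.1 with
        | none => ((b.2.2.getD 0 []).getD 1 0)
        | some p => p) = pvV ds k := by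
      rw [h3]
      by_cases hk0 : k = 0
      · subst hk0; rw [h4 0 (Or.inl rfl)]; rfl
      · simp only [if_neg hk0]
    have htot : a.1 + (if pvV ds (k+1) - pvV ds k < -25 then pvV ds (k+1) - pvV ds k else 0)
        = (if (b.2.2.getD (k+1) []).getD 1 0 -
              (match b.2.1 with
               | none => ((b.2.2.getD 0 []).getD 1 0)
               | some p => p) < -25
           then b.1 + ((b.2.2.getD (k+1) []).getD 1 0 -
              (match b.2.1 with
               | none => ((b.2.2.getD 0 []).getD 1 0)
               | some p => p))
           else b.1) := by
      rw [hcur, hprev, h1]; split_ifs <;> ring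
    refine ⟨?_, ?_, ?_, ?_⟩
    · simp only [pvStepA, pvStepB]; exact htot
    · simp only [pvStepA, pvStepB]
      rw [h2, htot]
    · simp only [pvStepB, hcur]
      simp
    · intro j hj
      have hne : j ≠ k + 1 := by
        rcases hj with h | h
        · omega
        · omega
      simp only [pvStepB]
      rw [pv_getD_modify_ne _ _ _ _ hne]
      apply h4
      rcases hj with h | h
      · exact Or.inl h
      · exact Or.inr (by omega)

theorem pv_ports_eq (ds : List (List Int)) : remove_soft_caps ds = remove_soft_caps_alt ds := by
  rw [pv_A_eq_fold, pv_B_eq_fold]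
  exact (pv_inv ds (ds.length - 1) le_rfl).2.1

-- ===== VERDICT (by name: the statement is the Claim_ definition above) =====
theorem remove_soft_caps_spec : Claim_equal_remove_soft_caps := by
  intro ds _ _
  unfold Spec_remove_soft_caps
  exact pv_ports_eq ds
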